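-- pv_equiv track=rewrite | github.com/NMGRL/pychron | pychron/experiment/automated_run/factory_util.py | increment_value
-- ===== SOURCE A (Python) =====
-- def increment_value(m, increment=1):
--     s = ','
--     if s not in m:
--         m = (m,)
--         s = ''
--     else:
--         m = m.split(s)
--
--     ms = []
--     for mi in m:
--         try:
--             ms.append(str(int(mi) + increment))
--         except ValueError:
--             return s.join(m)
--
--     return s.join(ms)
-- ===== SOURCE B (Python) =====
-- def increment_value(m, increment=1):
--     r = _inc(m, increment)
--     return m if r is None else r
--
--
-- def _inc(m, increment):
--     # recursive descent: peel off the part before the first comma, recurse on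
--     # the rest; None propagates "some part is not an int" back to the caller
--     head, sep, tail = m.partition(',')
--     try:
--         out = str(int(head) + increment)
--     except ValueError:
--         return None
--     if not sep:
--         return out
--     rest = _inc(tail, increment)
--     return None if rest is None else out + ',' + rest
-- ===== Notes on version B (the rewrite author's own statement) =====
-- stated objective: alternative
-- what changed: Replaces A's split-then-iterate loop (with its comma-vs-no-comma branching and rejoin-on-failure) by a recursive descent that peels the part before the first comma with partition, recurses on the remainder, and propagates failure as None, the wrapper returning the original string unchanged.
import Mathlib
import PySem

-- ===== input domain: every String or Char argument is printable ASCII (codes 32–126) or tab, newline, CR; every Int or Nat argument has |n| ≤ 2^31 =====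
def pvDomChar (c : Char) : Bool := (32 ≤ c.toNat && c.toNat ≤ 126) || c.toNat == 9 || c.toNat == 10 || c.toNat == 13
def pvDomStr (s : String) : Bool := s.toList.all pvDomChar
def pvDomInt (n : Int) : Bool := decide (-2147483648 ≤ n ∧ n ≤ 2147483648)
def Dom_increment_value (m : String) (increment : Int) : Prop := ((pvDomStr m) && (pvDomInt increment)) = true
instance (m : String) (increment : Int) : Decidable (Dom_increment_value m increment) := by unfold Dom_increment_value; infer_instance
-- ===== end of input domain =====

-- B replaces A's split-then-iterate loop by a recursive descent on the first comma
-- (partition, recurse on the remainder, propagate failure as None) — objective: alternative.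

-- ===== PORT A =====
-- the 'for mi in m: try … except ValueError: return s.join(m)' loop of A
def ivLoopA (s : String) (orig : List String) (increment : Int)
    (l : List String) (ms : List String) : String :=
  match l with
  | [] => PySem.Str.join s ms
  | mi :: rest =>
    match PySem.Int.ofStr? mi with
    | some v => ivLoopA s orig increment rest (ms ++ [PySem.Int.toStr (v + increment)])
    | none => PySem.Str.join s orig

def increment_value (m : String) (increment : Int) : String :=
  if PySem.Str.isIn "," m = false then
    -- m = (m,); s = ''
    ivLoopA "" [m] increment [m] []
  else
    -- m = m.split(','); s = ','
    let parts := (PySem.Chars.splitOn m.toList [',']).map String.ofList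
    ivLoopA "," parts increment parts []

-- ===== PORT B =====
-- _inc(m, increment): head, sep, tail = m.partition(','); over List Char the head is
-- takeWhile (≠ ','), sep is empty iff dropWhile (≠ ',') is empty, tail is its tail
def ivInc (l : List Char) (increment : Int) : Option (List Char) :=
  match PySem.Int.ofStr? (String.ofList (l.takeWhile (fun c => c ≠ ','))) with
  | none => none
  | some v =>
    match hrest : l.dropWhile (fun c => c ≠ ',') with
    | [] => some (PySem.Int.toStr (v + increment)).toList
    | _ :: tail =>
      match ivInc tail increment with
      | none => none
      | some r => some ((PySem.Int.toStr (v + increment)).toList ++ ',' :: r)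
termination_by l.length
decreasing_by
  have h := (List.dropWhile_suffix (l := l) (fun c => c ≠ ',')).length_le
  rw [hrest] at h
  simp at h
  omega

def increment_value_alt (m : String) (increment : Int) : String :=
  match ivInc m.toList increment with
  | none => m
  | some r => String.ofList r

-- ===== PRECONDITION & SPEC =====
def Spec_increment_value (m : String) (increment : Int) (out : String) : Prop := out = increment_value_alt m increment
instance (m : String) (increment : Int) (out : String) : Decidable (Spec_increment_value m increment out) := by unfold Spec_increment_value; infer_instance

-- ===== CLAIM (what is proved, stated in full; the proofs are below) =====
def Claim_equal_increment_value : Prop := ∀ (m : String) (increment : Int), Dom_increment_value m increment → Spec_increment_value m increment (increment_value m increment)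

-- ===== LEMMAS AND PROOFS =====

-- the comma-separated pieces of l, by the same first-comma recursion as ivInc
def ivPieces (l : List Char) : List (List Char) :=
  l.takeWhile (fun c => c ≠ ',') ::
    (match hrest : l.dropWhile (fun c => c ≠ ',') with
     | [] => []
     | _ :: tail => ivPieces tail)
termination_by l.length
decreasing_by
  have h := (List.dropWhile_suffix (l := l) (fun c => c ≠ ',')).length_le
  rw [hrest] at h
  simp at h
  omega

-- splitOn.go only reverse-prepends to acc
lemma iv_go_acc (sep : List Char) (fuel : Nat) (l cur : List Char) (acc : List (List Char)) :
    PySem.Chars.splitOn.go sep fuel l cur acc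
      = acc.reverse ++ PySem.Chars.splitOn.go sep fuel l cur [] := by
  induction fuel generalizing l cur acc with
  | zero => simp [PySem.Chars.splitOn.go]
  | succ fuel ih =>
    cases l with
    | nil => simp [PySem.Chars.splitOn.go]
    | cons c rest =>
      simp only [PySem.Chars.splitOn.go]
      split_ifs with h
      · rw [ih _ _ (_ :: acc), ih _ _ [_]]; simp
      · exact ih _ _ _

-- ivPieces is always a cons with the takeWhile head
lemma ivPieces_head_tail (l : List Char) :
    ivPieces l = l.takeWhile (fun c => c ≠ ',') :: (ivPieces l).tail := by
  conv_lhs => rw [ivPieces.eq_def]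
  rw [ivPieces.eq_def, List.tail_cons]

lemma ivPieces_drop_nil (l : List Char) (h : l.dropWhile (fun c => c ≠ ',') = []) :
    ivPieces l = [l.takeWhile (fun c => c ≠ ',')] := by
  rw [ivPieces.eq_def]
  split
  · rfl
  · next c t heq => rw [h] at heq; cases heq

lemma ivPieces_drop_cons (l : List Char) (c : Char) (t : List Char)
    (h : l.dropWhile (fun c => c ≠ ',') = c :: t) :
    ivPieces l = l.takeWhile (fun c => c ≠ ',') :: ivPieces t := by
  rw [ivPieces.eq_def]
  split
  · next heq => rw [h] at heq; cases heq
  · next c' t' heq =>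
    rw [h] at heq
    injection heq with h1 h2
    rw [h2]

-- equation lemmas for ivInc, one per shape of the input
lemma ivInc_none (l : List Char) (inc : Int)
    (h : PySem.Int.ofStr? (String.ofList (l.takeWhile (fun c => c ≠ ','))) = none) :
    ivInc l inc = none := by
  rw [ivInc.eq_def]
  simp only [h]

lemma ivInc_some_nil (l : List Char) (inc : Int) (v : Int)
    (hv : PySem.Int.ofStr? (String.ofList (l.takeWhile (fun c => c ≠ ','))) = some v)
    (h : l.dropWhile (fun c => c ≠ ',') = []) :
    ivInc l inc = some (PySem.Int.toStr (v + inc)).toList := by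
  rw [ivInc.eq_def]
  simp only [hv]
  split
  · rfl
  · next c t heq => rw [h] at heq; cases heq

lemma ivInc_some_cons (l : List Char) (inc : Int) (v : Int) (c : Char) (t : List Char)
    (hv : PySem.Int.ofStr? (String.ofList (l.takeWhile (fun c => c ≠ ','))) = some v)
    (h : l.dropWhile (fun c => c ≠ ',') = c :: t) :
    ivInc l inc =
      (match ivInc t inc with
       | none => none
       | some r => some ((PySem.Int.toStr (v + inc)).toList ++ ',' :: r)) := by
  rw [ivInc.eq_def]
  simp only [hv]
  split
  · next heq => rw [h] at heq; cases heq
  · next c' t' heq =>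
    rw [h] at heq
    injection heq with h1 h2
    rw [h2]

-- evaluation of splitOn.go on the single-char separator ',' in terms of ivPieces
lemma iv_go_comma (fuel : Nat) (l cur : List Char) (h : l.length ≤ fuel) :
    PySem.Chars.splitOn.go [','] fuel l cur [] =
      (cur.reverse ++ l.takeWhile (fun c => c ≠ ',')) :: (ivPieces l).tail := by
  induction fuel generalizing l cur with
  | zero =>
    have : l = [] := List.eq_nil_of_length_eq_zero (Nat.le_zero.mp h)
    subst this
    rw [ivPieces_drop_nil [] (by simp)]
    simp [PySem.Chars.splitOn.go]
  | succ fuel ih =>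
    cases l with
    | nil =>
      rw [ivPieces_drop_nil [] (by simp)]
      simp [PySem.Chars.splitOn.go]
    | cons c rest =>
      have hlen : rest.length ≤ fuel := by
        simpa using Nat.le_of_succ_le_succ (by simpa using h)
      by_cases hc : c = ','
      · subst hc
        simp only [PySem.Chars.splitOn.go]
        have hpre : [','].isPrefixOf (',' :: rest) = true := by simp [List.isPrefixOf]
        rw [if_pos hpre]
        simp only [List.length_cons, List.length_nil, List.drop_succ_cons, List.drop_zero]
        rw [iv_go_acc, ih rest [] hlen]
        have htake : (',' :: rest).takeWhile (fun c => c ≠ ',') = [] := by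
          simp [List.takeWhile]
        have hdrop : (',' :: rest).dropWhile (fun c => c ≠ ',') = ',' :: rest := by
          simp [List.dropWhile]
        rw [ivPieces_drop_cons _ _ _ hdrop, htake]
        rw [ivPieces_head_tail rest]
        simp
      · simp only [PySem.Chars.splitOn.go]
        have hpre : [','].isPrefixOf (c :: rest) = false := by
          simp [List.isPrefixOf]
          exact fun hccc => absurd hccc.symm hc
        rw [hpre]
        simp only [Bool.false_eq_true, if_false]
        rw [ih rest (c :: cur) hlen]
        have htake : (c :: rest).takeWhile (fun x => x ≠ ',') = c :: rest.takeWhile (fun x => x ≠ ',') := by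
          simp [List.takeWhile, hc]
        have htail : (ivPieces (c :: rest)).tail = (ivPieces rest).tail := by
          have hdrop : (c :: rest).dropWhile (fun x => x ≠ ',') = rest.dropWhile (fun x => x ≠ ',') := by
            simp [List.dropWhile, hc]
          cases hd : rest.dropWhile (fun x => x ≠ ',') with
          | nil =>
            rw [ivPieces_drop_nil _ (hdrop.trans hd), ivPieces_drop_nil _ hd]
            rfl
          | cons d t =>
            rw [ivPieces_drop_cons _ _ _ (hdrop.trans hd), ivPieces_drop_cons _ _ _ hd]
            rfl
        rw [htake, htail]
        simp

-- splitOn with separator ',' computes exactly ivPieces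
lemma iv_splitOn_eq_pieces (l : List Char) :
    PySem.Chars.splitOn l [','] = ivPieces l := by
  rw [PySem.Chars.splitOn, iv_go_comma (l.length + 1) l [] (Nat.le_succ _)]
  rw [ivPieces_head_tail l]
  simp

-- characterisation of B's recursion in terms of ivPieces
lemma ivInc_eq (inc : Int) (l : List Char) :
    ivInc l inc =
      if (ivPieces l).all (fun p => (PySem.Int.ofStr? (String.ofList p)).isSome) then
        some (PySem.Chars.join [',']
          ((ivPieces l).map
            (fun p => (PySem.Int.toStr ((PySem.Int.ofStr? (String.ofList p)).getD 0 + inc)).toList)))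
      else none := by
  induction l using ivPieces.induct with
  | _ l ih =>
    cases hv : PySem.Int.ofStr? (String.ofList (l.takeWhile (fun c => c ≠ ','))) with
    | none =>
      rw [ivInc_none l inc hv]
      cases hd : l.dropWhile (fun c => c ≠ ',') with
      | nil =>
        rw [ivPieces_drop_nil l hd,
          if_neg (by simp only [List.all_cons, List.all_nil, hv, Option.isSome_none, Bool.and_true]; decide)]
      | cons c t =>
        rw [ivPieces_drop_cons l c t hd,
          if_neg (by simp only [List.all_cons, hv, Option.isSome_none, Bool.false_and]; decide)]
    | some v =>
      cases hd : l.dropWhile (fun c => c ≠ ',') with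
      | nil =>
        rw [ivInc_some_nil l inc v hv hd, ivPieces_drop_nil l hd,
          if_pos (by simp only [List.all_cons, List.all_nil, hv, Option.isSome_some, Bool.and_true])]
        simp only [List.map_cons, List.map_nil, hv, Option.getD_some,
          PySem.Chars.join_singleton]
      | cons c t =>
        rw [ivInc_some_cons l inc v c t hv hd, ivPieces_drop_cons l c t hd, ih c t hd]
        by_cases hall : (ivPieces t).all (fun p => (PySem.Int.ofStr? (String.ofList p)).isSome)
        · rw [if_pos hall, if_pos (by simp only [List.all_cons, hv, Option.isSome_some, Bool.true_and]; exact hall)]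
          cases hpc : ivPieces t with
          | nil => exact absurd hpc (by rw [ivPieces.eq_def]; simp)
          | cons q qs =>
            simp only [hv, Option.getD_some, List.map_cons, PySem.Chars.join_cons_cons]
            simp
        · rw [if_neg hall, if_neg (by simp only [List.all_cons, hv, Option.isSome_some, Bool.true_and]; exact hall)]

-- characterisation of A's loop
lemma ivLoopA_eq (s : String) (orig : List String) (inc : Int) (l ms : List String) :
    ivLoopA s orig inc l ms =
      if l.all (fun p => (PySem.Int.ofStr? p).isSome) then
        PySem.Str.join s (ms ++ l.map (fun p => PySem.Int.toStr ((PySem.Int.ofStr? p).getD 0 + inc)))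
      else PySem.Str.join s orig := by
  induction l generalizing ms with
  | nil => simp [ivLoopA]
  | cons p rest ih =>
    simp only [ivLoopA]
    cases hp : PySem.Int.ofStr? p with
    | none => simp [hp]
    | some v =>
      show ivLoopA s orig inc rest (ms ++ [PySem.Int.toStr (v + inc)]) = _
      rw [ih]
      simp [hp]

-- go never returns []
lemma iv_go_ne_nil (sep : List Char) (fuel : Nat) (l cur : List Char) (acc : List (List Char)) :
    PySem.Chars.splitOn.go sep fuel l cur acc ≠ [] := by
  induction fuel generalizing l cur acc with
  | zero => simp [PySem.Chars.splitOn.go]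
  | succ fuel ih =>
    cases l with
    | nil => simp [PySem.Chars.splitOn.go]
    | cons c rest =>
      simp only [PySem.Chars.splitOn.go]
      split_ifs with h
      · exact ih _ _ _
      · exact ih _ _ _

-- join sep (go sep fuel l cur []) reconstructs cur.reverse ++ l (fuel large enough)
lemma iv_go_join (sep : List Char) (hsep : sep ≠ []) (fuel : Nat) (l cur : List Char)
    (h : l.length ≤ fuel) :
    PySem.Chars.join sep (PySem.Chars.splitOn.go sep fuel l cur []) = cur.reverse ++ l := by
  induction fuel generalizing l cur with
  | zero =>
    simp [PySem.Chars.splitOn.go, PySem.Chars.join_singleton]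
  | succ fuel ih =>
    cases l with
    | nil => simp [PySem.Chars.splitOn.go, PySem.Chars.join_singleton]
    | cons c rest =>
      simp only [PySem.Chars.splitOn.go]
      split_ifs with hp
      · rw [iv_go_acc]
        have hdrop : (List.drop sep.length (c :: rest)).length ≤ fuel := by
          have h1 : 0 < sep.length := List.length_pos_iff.mpr hsep
          have h2 : sep.length ≤ (c :: rest).length :=
            (List.isPrefixOf_iff_prefix.mp hp).length_le
          simp only [List.length_drop, List.length_cons] at h h2 ⊢
          omega
        obtain ⟨p, ps, hps⟩ : ∃ p ps, PySem.Chars.splitOn.go sep fuel (List.drop sep.length (c :: rest)) [] [] = p :: ps := by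
          cases hgo : PySem.Chars.splitOn.go sep fuel (List.drop sep.length (c :: rest)) [] [] with
          | nil => exact absurd hgo (iv_go_ne_nil _ _ _ _ _)
          | cons p ps => exact ⟨p, ps, rfl⟩
        have hjoin := ih (List.drop sep.length (c :: rest)) [] hdrop
        rw [hps] at hjoin ⊢
        simp only [List.reverse_nil, List.nil_append] at hjoin
        simp only [List.reverse_cons, List.reverse_nil, List.nil_append,
          List.singleton_append]
        rw [PySem.Chars.join_cons_cons, hjoin]
        have : sep ++ List.drop sep.length (c :: rest) = c :: rest := by
          conv_rhs => rw [← List.prefix_iff_eq_append.mp (List.isPrefixOf_iff_prefix.mp hp)]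
        simp [this]
      · have := ih rest (c :: cur) (by simpa using Nat.le_of_succ_le_succ (by simpa using h))
        rw [this]; simp

-- splitting on a character absent from l gives the single piece back
lemma iv_go_no_sep (c : Char) (fuel : Nat) (l cur : List Char) (h : c ∉ l) :
    PySem.Chars.splitOn.go [c] fuel l cur [] = [cur.reverse ++ l] := by
  induction l generalizing fuel cur with
  | nil => cases fuel <;> simp [PySem.Chars.splitOn.go]
  | cons d rest ih =>
    cases fuel with
    | zero => simp [PySem.Chars.splitOn.go]
    | succ fuel =>
      have hcd : c ≠ d := fun hc => h (hc ▸ List.mem_cons_self)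
      simp only [PySem.Chars.splitOn.go]
      have : [c].isPrefixOf (d :: rest) = false := by
        simp [List.isPrefixOf, hcd]
      rw [this]
      simp only [Bool.false_eq_true, if_false]
      rw [ih fuel (d :: cur) (fun hm => h (List.mem_cons_of_mem _ hm))]
      simp

-- Str.join of a single piece is the piece
lemma iv_join_singleton (sep : String) (p : String) :
    PySem.Str.join sep [p] = p := by
  simp [PySem.Str.join, PySem.Chars.join_singleton]

-- comma case: ','.join(m.split(',')) = m, at the Str level
lemma iv_join_split (m : String) :
    PySem.Str.join "," ((PySem.Chars.splitOn m.toList [',']).map String.ofList) = m := by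
  have h := iv_go_join [','] (by simp) (m.toList.length + 1) m.toList []
    (Nat.le_succ _)
  simp only [List.reverse_nil, List.nil_append] at h
  have : PySem.Str.join "," ((PySem.Chars.splitOn m.toList [',']).map String.ofList)
      = String.ofList (PySem.Chars.join [','] (PySem.Chars.splitOn m.toList [','])) := by
    simp [PySem.Str.join, PySem.Chars.splitOn, Function.comp_def, String.toList_ofList]
  rw [this, PySem.Chars.splitOn, h]
  simp

-- no-comma case: the split is the single piece [m]
lemma iv_split_no_comma (m : String) (h : PySem.Str.isIn "," m = false) :
    (PySem.Chars.splitOn m.toList [',']).map String.ofList = [m] := by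
  have hmem : (',' : Char) ∉ m.toList := by
    intro hm
    obtain ⟨s, t, hst⟩ := List.append_of_mem hm
    have hinf : ("," : String).toList <:+: m.toList := ⟨s, t, by simp [hst]⟩
    have := PySem.Str.isIn_iff_infix "," m |>.mpr hinf
    rw [h] at this
    cases this
  rw [PySem.Chars.splitOn, iv_go_no_sep ',' _ _ [] hmem]
  simp

-- B's result, expressed over the string parts of the split
lemma increment_value_alt_eq (m : String) (inc : Int) :
    increment_value_alt m inc =
      (let parts := (PySem.Chars.splitOn m.toList [',']).map String.ofList
       if parts.all (fun p => (PySem.Int.ofStr? p).isSome) then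
         PySem.Str.join "," (parts.map (fun p => PySem.Int.toStr ((PySem.Int.ofStr? p).getD 0 + inc)))
       else m) := by
  unfold increment_value_alt
  rw [ivInc_eq inc, ← iv_splitOn_eq_pieces]
  simp only []
  by_cases hall : (PySem.Chars.splitOn m.toList [',']).all
      (fun p => (PySem.Int.ofStr? (String.ofList p)).isSome)
  · rw [if_pos hall]
    have hall' : ((PySem.Chars.splitOn m.toList [',']).map String.ofList).all
        (fun p => (PySem.Int.ofStr? p).isSome) := by
      simpa [List.all_map, Function.comp_def] using hall
    rw [if_pos hall']
    simp [PySem.Str.join, List.map_map, Function.comp_def]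
  · rw [if_neg hall]
    have hall' : ¬ ((PySem.Chars.splitOn m.toList [',']).map String.ofList).all
        (fun p => (PySem.Int.ofStr? p).isSome) := by
      simpa [List.all_map, Function.comp_def] using hall
    rw [if_neg hall']

-- ===== VERDICT (by name: the statement is the Claim_ definition above) =====
theorem increment_value_spec : Claim_equal_increment_value := by
  intro m increment _
  unfold Spec_increment_value increment_value
  rw [increment_value_alt_eq]
  by_cases hc : PySem.Str.isIn "," m = false
  · rw [if_pos hc, iv_split_no_comma m hc, ivLoopA_eq]
    simp only [List.nil_append, List.map_cons, List.map_nil, List.all_cons, List.all_nil,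
      Bool.and_true]
    split_ifs with hp
    · rw [iv_join_singleton, iv_join_singleton]
    · rw [iv_join_singleton]
  · rw [if_neg hc, ivLoopA_eq]
    simp only [List.nil_append]
    split_ifs with hp
    · rfl
    · exact iv_join_split m
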